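-- pv_equiv track=rewrite | github.com/JoseProano/Lab1P2-SoftwareSeguro-27894 | src/integration/improved_hybrid_scanner.py | split_code_into_chunks
-- ===== SOURCE A (Python) =====
-- def split_code_into_chunks(code, language):
--     """Split code into chunks"""
--     chunks = []
--     lines = code.split('\n')
--
--     current_chunk = []
--     current_line = 0
--
--     for i, line in enumerate(lines):
--         is_function_start = any(p in line for p in [
--             'def ', 'function ', 'public ', 'private ', 'protected ',
--             '@app.', '@GetMapping', '@PostMapping', 'app.get(', 'app.post('
--         ])
--
--         if is_function_start and current_chunk:
--             chunk_code = '\n'.join(current_chunk)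
--             if len(chunk_code.strip()) > 10:
--                 chunks.append((chunk_code, current_line))
--             current_chunk = []
--             current_line = i
--
--         current_chunk.append(line)
--
--     if current_chunk:
--         chunk_code = '\n'.join(current_chunk)
--         if len(chunk_code.strip()) > 10:
--             chunks.append((chunk_code, current_line))
--
--     if not chunks:
--         chunks = [(code, 0)]
--
--     return chunks
-- ===== SOURCE B (Python) =====
-- MARKERS = ['def ', 'function ', 'public ', 'private ', 'protected ',
--            '@app.', '@GetMapping', '@PostMapping', 'app.get(', 'app.post(']
--
--
-- def _is_boundary(line):
--     return any(p in line for p in MARKERS)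
--
--
-- def split_code_into_chunks(code, language):
--     """Split code into chunks: find boundary indices first, then partition."""
--     lines = code.split('\n')
--     bounds = [0]
--     for i, line in enumerate(lines):
--         if i > 0 and _is_boundary(line):
--             bounds.append(i)
--     bounds.append(len(lines))
--     chunks = []
--     for start, stop in zip(bounds, bounds[1:]):
--         seg = '\n'.join(lines[start:stop])
--         if len(seg.strip()) > 10:
--             chunks.append((seg, start))
--     return chunks if chunks else [(code, 0)]
-- ===== Notes on version B (the rewrite author's own statement) =====
-- stated objective: alternative
-- what changed: Replaces the streaming accumulator (current_chunk/current_line mutated while scanning) by a two-phase 'find boundary indices, then partition': first collect every line index whose line contains a marker, then slice lines between consecutive boundaries and join.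
import Mathlib
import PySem

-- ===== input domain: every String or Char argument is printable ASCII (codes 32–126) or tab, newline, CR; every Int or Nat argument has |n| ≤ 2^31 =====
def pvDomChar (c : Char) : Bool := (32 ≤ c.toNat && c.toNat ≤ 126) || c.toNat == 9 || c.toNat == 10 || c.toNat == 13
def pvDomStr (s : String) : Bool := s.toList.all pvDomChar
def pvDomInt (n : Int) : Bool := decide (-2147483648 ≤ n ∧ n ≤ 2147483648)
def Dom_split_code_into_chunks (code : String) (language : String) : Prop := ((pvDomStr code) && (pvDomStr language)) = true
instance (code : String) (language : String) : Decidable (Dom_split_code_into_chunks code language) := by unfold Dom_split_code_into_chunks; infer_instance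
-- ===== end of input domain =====

-- B organises the work as 'find boundary indices, then partition into slices' instead of
-- A's streaming accumulator; same return value, no speed claim.

def pvMarkers : List String :=
  ["def ", "function ", "public ", "private ", "protected ",
   "@app.", "@GetMapping", "@PostMapping", "app.get(", "app.post("]

-- ===== PORT A =====
-- one loop iteration of A (state = (chunks, current_chunk, current_line))
def pvStepA (st : List (String × Int) × List String × Int) (p : Int × String) :
    List (String × Int) × List String × Int :=
  let is_function_start := pvMarkers.any (fun q => PySem.Str.isIn q p.2)
  let st :=
    if is_function_start && !st.2.1.isEmpty then
      let chunk_code := PySem.Str.join "\n" st.2.1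
      (if 10 < PySem.Str.len (PySem.Str.strip chunk_code) then st.1 ++ [(chunk_code, st.2.2)]
       else st.1, ([] : List String), p.1)
    else st
  (st.1, st.2.1 ++ [p.2], st.2.2)

def split_code_into_chunks (code : String) (language : String) : List (String × Int) :=
  let lines := (PySem.Str.split? code "\n").getD []
  let st := (PySem.List.enumerate lines 0).foldl pvStepA ([], [], 0)
  let chunks :=
    if !st.2.1.isEmpty then
      let chunk_code := PySem.Str.join "\n" st.2.1
      if 10 < PySem.Str.len (PySem.Str.strip chunk_code) then st.1 ++ [(chunk_code, st.2.2)]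
      else st.1
    else st.1
  if chunks.isEmpty then [(code, 0)] else chunks

-- ===== PORT B =====
def pvIsBoundary (line : String) : Bool := pvMarkers.any (fun q => PySem.Str.isIn q line)

def split_code_into_chunks_alt (code : String) (language : String) : List (String × Int) :=
  let lines := (PySem.Str.split? code "\n").getD []
  let bounds := (0 : Int) ::
    ((PySem.List.enumerate lines 0).foldl
      (fun bs p => if 0 < p.1 && pvIsBoundary p.2 then bs ++ [p.1] else bs) [])
    ++ [PySem.List.len lines]
  let chunks := (bounds.zip (PySem.List.slice bounds (some 1) none)).foldl
    (fun acc se =>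
      let seg := PySem.Str.join "\n" (PySem.List.slice lines (some se.1) (some se.2))
      if 10 < PySem.Str.len (PySem.Str.strip seg) then acc ++ [(seg, se.1)] else acc) []
  if chunks.isEmpty then [(code, 0)] else chunks

-- ===== PRECONDITION & SPEC =====
def Spec_split_code_into_chunks (code : String) (language : String) (out : List (String × Int)) : Prop := out = split_code_into_chunks_alt code language
instance (code : String) (language : String) (out : List (String × Int)) : Decidable (Spec_split_code_into_chunks code language out) := by unfold Spec_split_code_into_chunks; infer_instance

-- ===== CLAIM (what is proved, stated in full; the proofs are below) =====
def Claim_equal_split_code_into_chunks : Prop := ∀ (code : String) (language : String), Dom_split_code_into_chunks code language → Spec_split_code_into_chunks code language (split_code_into_chunks code language)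

-- ===== LEMMAS AND PROOFS =====

def pvEmit (seg : String) (s : Int) : List (String × Int) :=
  if 10 < PySem.Str.len (PySem.Str.strip seg) then [(seg, s)] else []

-- the common structural segmentation both ports compute
def pvSegs : List String → Int → List (String × Int)
  | [], _ => []
  | l :: ls, i =>
    let pre := ls.takeWhile (fun x => !pvIsBoundary x)
    pvEmit (PySem.Str.join "\n" (l :: pre)) i ++
      pvSegs (ls.drop pre.length) (i + 1 + (pre.length : Int))
  termination_by ls _ => ls.length
  decreasing_by
    simp only [List.length_cons, List.length_drop]
    omega

def pvGlue (ls : List String) (i : Int) (cur : List String) (cl : Int) : List (String × Int) :=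
  let pre := ls.takeWhile (fun x => !pvIsBoundary x)
  pvEmit (PySem.Str.join "\n" (cur ++ pre)) cl ++
    pvSegs (ls.drop pre.length) (i + (pre.length : Int))

def pvFinal (st : List (String × Int) × List String × Int) : List (String × Int) :=
  if !st.2.1.isEmpty then
    let chunk_code := PySem.Str.join "\n" st.2.1
    if 10 < PySem.Str.len (PySem.Str.strip chunk_code) then st.1 ++ [(chunk_code, st.2.2)]
    else st.1
  else st.1

lemma pvSegs_cons_eq_glue (l : String) (ls : List String) (i : Int) :
    pvSegs (l :: ls) i = pvGlue ls (i + 1) [l] i := by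
  rw [pvSegs, pvGlue]
  simp [add_assoc]

lemma pvFoldA (ls : List String) (i : Int) (acc : List (String × Int))
    (cur : List String) (cl : Int) (h : cur ≠ []) :
    pvFinal ((PySem.List.enumerate ls i).foldl pvStepA (acc, cur, cl))
      = acc ++ pvGlue ls i cur cl := by
  induction ls generalizing i acc cur cl with
  | nil =>
    simp only [PySem.List.enumerate_nil, List.foldl_nil, pvFinal, pvGlue, List.takeWhile_nil,
      List.drop_nil, pvSegs, List.append_nil, List.isEmpty_eq_false_iff.mpr h]
    simp [pvEmit]
    split_ifs <;> simp
  | cons l ls ih =>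
    rw [PySem.List.enumerate_cons, List.foldl_cons]
    by_cases hb : pvIsBoundary l
    · have hstep : pvStepA (acc, cur, cl) (i, l)
          = (acc ++ pvEmit (PySem.Str.join "\n" cur) cl, [l], i) := by
        simp only [pvStepA, pvIsBoundary] at hb ⊢
        rw [hb]
        simp only [List.isEmpty_eq_false_iff.mpr h, Bool.not_false, Bool.and_true, if_pos rfl]
        simp [pvEmit]
        split_ifs <;> simp
      rw [hstep, ih _ _ _ _ (by simp), ← pvSegs_cons_eq_glue]
      rw [pvGlue]
      simp only [List.takeWhile_cons, hb, Bool.not_true]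
      simp [pvSegs_cons_eq_glue]
    · have hstep : pvStepA (acc, cur, cl) (i, l) = (acc, cur ++ [l], cl) := by
        simp only [pvStepA, pvIsBoundary] at hb ⊢
        rw [Bool.not_eq_true] at hb
        rw [hb]
        simp
      rw [hstep, ih _ _ _ _ (by simp)]
      rw [pvGlue, pvGlue]
      simp only [List.takeWhile_cons, hb]
      rw [Bool.not_eq_true] at hb
      simp [hb, List.append_assoc, add_assoc, add_comm (1 : Int)]

-- marker-index list (B's first pass, structurally)
def pvMk : List String → Int → List Int
  | [], _ => []
  | l :: ls, i => (if pvIsBoundary l then [i] else []) ++ pvMk ls (i + 1)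

lemma pvFoldMk (ls : List String) (i : Int) (acc : List Int) (h : 1 ≤ i) :
    (PySem.List.enumerate ls i).foldl
        (fun bs p => if 0 < p.1 && pvIsBoundary p.2 then bs ++ [p.1] else bs) acc
      = acc ++ pvMk ls i := by
  induction ls generalizing i acc with
  | nil => simp [pvMk]
  | cons l ls ih =>
    rw [PySem.List.enumerate_cons, List.foldl_cons]
    have h0 : (0 : Int) < i := by omega
    by_cases hb : pvIsBoundary l
    · rw [if_pos (by simp [hb, h0]), ih _ _ (by omega), pvMk]
      simp [hb]
    · rw [if_neg (by simp [hb]), ih _ _ (by omega), pvMk]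
      simp [hb]

lemma pvMk_takeWhile (ls : List String) (i : Int) :
    pvMk ls i =
      (match ls.drop (ls.takeWhile (fun x => !pvIsBoundary x)).length with
       | [] => []
       | _ :: rs => (i + ((ls.takeWhile (fun x => !pvIsBoundary x)).length : Int)) ::
           pvMk rs (i + ((ls.takeWhile (fun x => !pvIsBoundary x)).length : Int) + 1)) := by
  induction ls generalizing i with
  | nil => simp [pvMk]
  | cons l ls ih =>
    by_cases hb : pvIsBoundary l
    · simp [pvMk, hb, List.takeWhile_cons]
    · have hb' : pvIsBoundary l = false := by rwa [Bool.not_eq_true] at hb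
      rw [pvMk, ih (i + 1)]
      simp only [hb', if_false, List.nil_append, List.takeWhile_cons, Bool.not_false, if_true,
        List.length_cons, List.drop_succ_cons]
      rcases hdrop : ls.drop (ls.takeWhile (fun x => !pvIsBoundary x)).length with _ | ⟨r, rs⟩
      · simp
      · simp only [Bool.false_eq_true, if_false, List.nil_append]
        push_cast
        ring_nf

-- B's second pass, structurally (pairs of consecutive bounds)
def pvPB (lines : List String) : List Int → List (String × Int) → List (String × Int)
  | b1 :: b2 :: bs, acc =>
    pvPB lines (b2 :: bs)
      (acc ++ pvEmit (PySem.Str.join "\n" (PySem.List.slice lines (some b1) (some b2))) b1)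
  | _, acc => acc

lemma pvIfEmit (s : String) (b : Int) (acc : List (String × Int)) :
    (if 10 < PySem.Str.len (PySem.Str.strip s) then acc ++ [(s, b)] else acc)
      = acc ++ pvEmit s b := by
  rw [pvEmit]
  split_ifs <;> simp

lemma pvPB_single (lines : List String) (b : Int) (acc : List (String × Int)) :
    pvPB lines [b] acc = acc := rfl

lemma pvZipFold (lines : List String) (bounds : List Int) (acc : List (String × Int)) :
    (bounds.zip bounds.tail).foldl
        (fun acc se =>
          let seg := PySem.Str.join "\n" (PySem.List.slice lines (some se.1) (some se.2))
          if 10 < PySem.Str.len (PySem.Str.strip seg) then acc ++ [(seg, se.1)] else acc) acc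
      = pvPB lines bounds acc := by
  induction bounds generalizing acc with
  | nil => rfl
  | cons b1 bs ih =>
    cases bs with
    | nil => rfl
    | cons b2 bs' =>
      simp only [List.tail_cons, List.zip_cons_cons, List.foldl_cons]
      rw [pvPB, ← ih]
      simp only [List.tail_cons]
      rw [pvIfEmit]

lemma pvPB_step (lines : List String) (b1 b2 : Int) (bs : List Int) (acc : List (String × Int)) :
    pvPB lines (b1 :: b2 :: bs) acc
      = pvPB lines (b2 :: bs)
          (acc ++ pvEmit (PySem.Str.join "\n" (PySem.List.slice lines (some b1) (some b2))) b1) := by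
  rw [pvPB]

lemma pvTake_takeWhile (p : String → Bool) (ls : List String) :
    ls.take (ls.takeWhile p).length = ls.takeWhile p :=
  ((List.prefix_iff_eq_take.mp (List.takeWhile_prefix p))).symm

lemma pvSliceSeg (lines : List String) (cl a m : Nat) (hcl : cl ≤ a)
    (hm : a + m ≤ lines.length) :
    PySem.List.slice lines (some (cl : Int)) (some ((a : Int) + (m : Int)))
      = (lines.drop cl).take (a - cl) ++ (lines.drop a).take m := by
  have h1 : ((a : Int) + (m : Int)) = ((a + m : Nat) : Int) := by push_cast; ring
  rw [h1, PySem.List.slice_of_nonneg lines (by positivity) (by positivity)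
    (by exact_mod_cast le_trans (by omega) hm) (by exact_mod_cast hm)]
  simp only [Int.toNat_natCast]
  rw [show a + m - cl = (a - cl) + m by omega, List.take_add]
  congr 1
  rw [List.drop_drop]
  congr 2
  omega

-- main bridge: B's pair loop over the remaining bounds equals pvGlue
lemma pvPBGlue (k : Nat) : ∀ (lines : List String) (a cl : Nat) (acc : List (String × Int)),
    lines.length - a ≤ k → 1 ≤ a → a ≤ lines.length → cl ≤ a →
    pvPB lines ((cl : Int) :: (pvMk (lines.drop a) (a : Int) ++ [(lines.length : Int)])) acc
      = acc ++ pvGlue (lines.drop a) (a : Int) ((lines.drop cl).take (a - cl)) (cl : Int) := by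
  induction k with
  | zero =>
    intro lines a cl acc hk h1 ha hcl
    -- lines.drop a = []
    have hdrop : lines.drop a = [] := by
      apply List.drop_eq_nil_of_le; omega
    rw [hdrop]
    simp only [pvMk, List.nil_append]
    rw [pvPB_step, pvPB_single, pvGlue]
    simp only [List.takeWhile_nil, List.length_nil, List.drop_nil, pvSegs, List.append_nil,
      Nat.cast_zero, add_zero]
    have hLa : ((lines.length : Nat) : Int) = ((a : Nat) : Int) := by omega
    rw [hLa]
    congr 2
    have := pvSliceSeg lines cl a 0 hcl (by omega)
    simp only [Nat.cast_zero, add_zero, List.take_zero, List.append_nil] at this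
    rw [this]
  | succ k ih =>
    intro lines a cl acc hk h1 ha hcl
    set sfx := lines.drop a with hsfx
    set pre := sfx.takeWhile (fun x => !pvIsBoundary x) with hpre
    rw [pvMk_takeWhile]
    rcases hrest : sfx.drop pre.length with _ | ⟨r, rs⟩
    · -- no further boundary: single pair (cl, n)
      rw [List.nil_append, pvPB_step, pvPB_single, pvGlue]
      rw [← hpre, hrest]
      simp only [pvSegs, List.append_nil]
      congr 2
      have hpreall : pre = sfx := by
        have hplen : sfx.length ≤ pre.length := by
          have := congrArg List.length hrest
          simp at this
          omega
        exact (List.takeWhile_prefix _).eq_of_length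
          (le_antisymm ((List.takeWhile_prefix _).length_le) hplen)
      have hslice := pvSliceSeg lines cl a sfx.length hcl (by simp [hsfx]; omega)
      have hn : (a : Int) + (sfx.length : Int) = (lines.length : Int) := by
        have : sfx.length = lines.length - a := by simp [hsfx]
        omega
      rw [hn] at hslice
      rw [hslice, ← hsfx]
      rw [List.take_length]
      rw [hpreall]
    · -- next boundary at b = a + pre.length
      rw [List.cons_append, pvPB_step]
      have hblen : a + pre.length < lines.length := by
        have := congrArg List.length hrest
        simp [hsfx] at this
        omega
      have hdb : lines.drop (a + pre.length) = r :: rs := by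
        have h := hrest
        rw [hsfx, List.drop_drop] at h
        exact h
      have hrs : rs = lines.drop (a + pre.length + 1) := by
        have := congrArg (List.drop 1) hdb
        simp at this
        exact this.symm
      have hcast : (a : Int) + ((pre.length : Nat) : Int) = ((a + pre.length : Nat) : Int) := by
        push_cast; ring
      rw [← hpre, hcast]
      rw [show ((a + pre.length : Nat) : Int) + 1 = ((a + pre.length + 1 : Nat) : Int) from by
        push_cast; ring, hrs]
      have hk' : lines.length - (a + pre.length + 1) ≤ k := by omega
      rw [ih lines (a + pre.length + 1) (a + pre.length) _ hk' (by omega) (by omega) (by omega)]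
      have hseg : PySem.List.slice lines (some (cl : Int)) (some ((a + pre.length : Nat) : Int))
          = ((lines.drop cl).take (a - cl)) ++ pre := by
        have := pvSliceSeg lines cl a pre.length hcl (by omega)
        rw [hcast] at this
        rw [this]
        congr 1
        rw [hpre, hsfx]
        exact pvTake_takeWhile _ _
      rw [hseg]
      have hr1 : (lines.drop (a + pre.length)).take (a + pre.length + 1 - (a + pre.length)) = [r] := by
        rw [hdb]
        simp
      rw [hr1]
      conv_rhs => rw [pvGlue]
      rw [← hpre, hrest, pvSegs_cons_eq_glue, hrs]
      push_cast
      simp [List.append_assoc]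

lemma pvSliceTail (x : Int) (xs : List Int) :
    PySem.List.slice (x :: xs) (some 1) none = xs := by
  rw [PySem.List.slice_some_none]
  simp [PySem.List.clampIdx]

lemma pvZipFoldCons (lines : List String) (x : Int) (xs : List Int) (acc : List (String × Int)) :
    ((x :: xs).zip xs).foldl
        (fun acc se =>
          let seg := PySem.Str.join "\n" (PySem.List.slice lines (some se.1) (some se.2))
          if 10 < PySem.Str.len (PySem.Str.strip seg) then acc ++ [(seg, se.1)] else acc) acc
      = pvPB lines (x :: xs) acc :=
  pvZipFold lines (x :: xs) acc

lemma pvPBGlue_top (l : String) (ls : List String) :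
    pvPB (l :: ls) ((0 : Int) :: (pvMk ls 1 ++ [((l :: ls).length : Int)])) []
      = pvSegs (l :: ls) 0 := by
  have hG := pvPBGlue (l :: ls).length (l :: ls) 1 0 [] (by omega) (le_refl 1) (by simp)
    (by omega)
  rw [show List.drop 1 (l :: ls) = ls from rfl,
    show List.take (1 - 0) (List.drop 0 (l :: ls)) = [l] from rfl,
    show ((0 : Nat) : Int) = 0 from rfl, show ((1 : Nat) : Int) = 1 from rfl,
    List.nil_append] at hG
  rw [hG, pvSegs_cons_eq_glue, show (0 : Int) + 1 = 1 from rfl]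

lemma pvMain (code language : String) :
    split_code_into_chunks code language = split_code_into_chunks_alt code language := by
  rcases hl : (PySem.Str.split? code "\n").getD [] with _ | ⟨l, ls⟩
  · have hA : split_code_into_chunks code language = [(code, 0)] := by
      unfold split_code_into_chunks
      rw [hl]
      rfl
    have hB : split_code_into_chunks_alt code language = [(code, 0)] := by
      unfold split_code_into_chunks_alt
      rw [hl]
      rfl
    rw [hA, hB]
  · have hA : split_code_into_chunks code language
        = (if (pvSegs (l :: ls) 0).isEmpty then [(code, 0)] else pvSegs (l :: ls) 0) := by
      unfold split_code_into_chunks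
      rw [hl]
      show (let st := (PySem.List.enumerate (l :: ls) 0).foldl pvStepA ([], [], 0);
            let chunks := pvFinal st;
            if chunks.isEmpty then [(code, 0)] else chunks) = _
      rw [PySem.List.enumerate_cons, List.foldl_cons,
        show pvStepA ([], [], 0) ((0 : Int), l) = ([], [l], (0 : Int)) from by simp [pvStepA],
        show (0 : Int) + 1 = 1 from rfl]
      dsimp only
      rw [pvFoldA ls 1 [] [l] 0 (by simp), List.nil_append, pvSegs_cons_eq_glue,
        show (0 : Int) + 1 = 1 from rfl]
    have hB : split_code_into_chunks_alt code language
        = (if (pvSegs (l :: ls) 0).isEmpty then [(code, 0)] else pvSegs (l :: ls) 0) := by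
      unfold split_code_into_chunks_alt
      rw [hl]
      show (let bounds := (0 : Int) ::
              ((PySem.List.enumerate (l :: ls) 0).foldl
                (fun bs p => if 0 < p.1 && pvIsBoundary p.2 then bs ++ [p.1] else bs) [])
              ++ [PySem.List.len (l :: ls)];
            let chunks := (bounds.zip (PySem.List.slice bounds (some 1) none)).foldl
              (fun acc se =>
                let seg := PySem.Str.join "\n" (PySem.List.slice (l :: ls) (some se.1) (some se.2))
                if 10 < PySem.Str.len (PySem.Str.strip seg) then acc ++ [(seg, se.1)] else acc) [];
            if chunks.isEmpty then [(code, 0)] else chunks) = _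
      rw [PySem.List.enumerate_cons, List.foldl_cons, show (0 : Int) + 1 = 1 from rfl]
      dsimp only
      rw [show (decide ((0 : Int) < (0 : Int)) && pvIsBoundary l) = false from by simp]
      simp only [Bool.false_eq_true, if_false]
      rw [pvFoldMk ls 1 [] (le_refl 1), List.nil_append, PySem.List.len_eq, List.cons_append,
        pvSliceTail, pvZipFoldCons, pvPBGlue_top]
    rw [hA, hB]

-- ===== VERDICT (by name: the statement is the Claim_ definition above) =====
theorem split_code_into_chunks_spec : Claim_equal_split_code_into_chunks := by
  intro code language _
  unfold Spec_split_code_into_chunks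
  exact pvMain code language
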